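-- pv_equiv track=rewrite | github.com/frankieramirez/comicarr | comicarr/db.py | _convert_positional_to_named
-- ===== SOURCE A (Python) =====
-- def _convert_positional_to_named(query, args=None):
--     """Convert ? placeholders to :param_N named parameters.
--
--     Uses a state machine to skip ? inside single-quoted strings.
--     Returns (converted_query, params_dict).
--     """
--     result = []
--     param_index = 0
--     in_string = False
--     i = 0
--     while i < len(query):
--         char = query[i]
--         if char == "'" and not in_string:
--             in_string = True
--         elif char == "'" and in_string:
--             if i + 1 < len(query) and query[i + 1] == "'":
--                 result.append("''")
--                 i += 2
--                 continue
--             in_string = False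
--         elif char == "?" and not in_string:
--             result.append(f":param_{param_index}")
--             param_index += 1
--             i += 1
--             continue
--         result.append(char)
--         i += 1
--
--     converted = "".join(result)
--
--     if args is None:
--         return converted, {}
--
--     if isinstance(args, (list, tuple)):
--         return converted, {f"param_{i}": v for i, v in enumerate(args)}
--
--     return converted, args
-- ===== SOURCE B (Python) =====
-- def _convert_positional_to_named(query, args=None):
--     """Convert ? placeholders to :param_N named parameters.
--
--     Tokenizer: consumes whole single-quoted string literals ('' escapes,
--     unterminated tail included) in one slice, rewrites each bare ?.
--     Returns (converted_query, params_dict).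
--     """
--     out = []
--     n = 0
--     i = 0
--     L = len(query)
--     while i < L:
--         c = query[i]
--         if c == "'":
--             j = i + 1
--             while j < L:
--                 if query[j] != "'":
--                     j += 1
--                 elif j + 1 < L and query[j + 1] == "'":
--                     j += 2
--                 else:
--                     j += 1
--                     break
--             out.append(query[i:j])
--             i = j
--         elif c == "?":
--             out.append(f":param_{n}")
--             n += 1
--             i += 1
--         else:
--             out.append(c)
--             i += 1
--     converted = "".join(out)
--
--     if args is None:
--         return converted, {}
--
--     if isinstance(args, (list, tuple)):
--         return converted, {f"param_{i}": v for i, v in enumerate(args)}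
--
--     return converted, args
-- ===== Notes on version B (the rewrite author's own statement) =====
-- stated objective: alternative
-- what changed: Replaced A's char-by-char state machine with an in_string flag by a tokenizer that consumes each single-quoted literal (with '' escapes and unterminated tails) whole via an inner scan and slice, rewriting only bare ? tokens; the args-to-dict logic is unchanged.
import Mathlib
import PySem

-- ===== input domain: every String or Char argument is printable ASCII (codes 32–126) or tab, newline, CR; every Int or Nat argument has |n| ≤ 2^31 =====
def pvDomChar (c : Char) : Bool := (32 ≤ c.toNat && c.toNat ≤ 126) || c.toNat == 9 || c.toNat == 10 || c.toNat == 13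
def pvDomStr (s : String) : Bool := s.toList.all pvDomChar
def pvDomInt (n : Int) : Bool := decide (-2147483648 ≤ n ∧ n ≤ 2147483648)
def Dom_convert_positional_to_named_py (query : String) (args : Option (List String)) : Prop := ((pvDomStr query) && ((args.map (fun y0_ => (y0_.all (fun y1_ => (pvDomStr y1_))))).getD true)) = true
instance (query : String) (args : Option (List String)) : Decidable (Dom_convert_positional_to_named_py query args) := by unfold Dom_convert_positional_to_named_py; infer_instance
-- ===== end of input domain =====

-- B replaces A's char-by-char state machine (an `in_string` flag) by a tokenizer that
-- consumes each single-quoted literal whole; objective: alternative decomposition, same cost.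

-- ===== PORT A =====
-- A's while-loop: one char at a time, `inStr` is A's in_string flag, n is param_index;
-- result chunks are joined, ported as concatenation over List Char.
def pvLoopA : List Char → Bool → Int → List Char
  | [], _, _ => []
  | c :: cs, inStr, n =>
    if c = '\'' then
      if inStr then
        match h : cs with
        | c2 :: cs2 =>
          if c2 = '\'' then '\'' :: '\'' :: pvLoopA cs2 true n
          else '\'' :: pvLoopA cs false n
        | [] => '\'' :: pvLoopA [] false n
      else '\'' :: pvLoopA cs true n
    else if c = '?' ∧ inStr = false then
      ":param_".toList ++ PySem.Int.toChars n ++ pvLoopA cs inStr (n + 1)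
    else c :: pvLoopA cs inStr n
termination_by cs _ _ => cs.length
decreasing_by all_goals (try subst h); simp only [List.length_cons]; omega

def convert_positional_to_named_py (query : String) (args : Option (List String)) : String × (List (String × String)) :=
  let converted := String.ofList (pvLoopA query.toList false 0)
  match args with
  | none => (converted, [])
  | some l =>
      (converted, (PySem.List.enumerate l).map (fun iv => (String.ofList ("param_".toList ++ PySem.Int.toChars iv.1), iv.2)))

-- ===== PORT B =====
-- Source B's inner while j < L loop: consume the body of a single-quoted literal
-- (after the opening quote), returning (consumed chars, rest).
def pvConsumeStr : List Char → List Char × List Char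
  | [] => ([], [])
  | c :: cs =>
    if c = '\'' then
      match cs with
      | c2 :: cs2 =>
        if c2 = '\'' then
          let p := pvConsumeStr cs2
          ('\'' :: '\'' :: p.1, p.2)
        else (['\''], cs)
      | [] => (['\''], [])
    else
      let p := pvConsumeStr cs
      (c :: p.1, p.2)

theorem pvConsumeStr_len : ∀ cs : List Char, (pvConsumeStr cs).2.length ≤ cs.length
  | [] => Nat.le_refl _
  | c :: cs => by
    unfold pvConsumeStr
    by_cases h : c = '\''
    · simp only [if_pos h]
      match cs with
      | [] => simp
      | c2 :: cs2 =>
        by_cases h2 : c2 = '\''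
        · simp only [if_pos h2]
          have := pvConsumeStr_len cs2
          simp only [List.length_cons]
          omega
        · simp only [if_neg h2]
          simp
    · simp only [if_neg h]
      have := pvConsumeStr_len cs
      simp only [List.length_cons]
      omega

-- Source B's outer while loop: tokenizer over whole literals / '?' / plain chars.
def pvLoopB : List Char → Int → List Char
  | [], _ => []
  | c :: cs, n =>
    if c = '\'' then
      '\'' :: (pvConsumeStr cs).1 ++ pvLoopB (pvConsumeStr cs).2 n
    else if c = '?' then
      ":param_".toList ++ PySem.Int.toChars n ++ pvLoopB cs (n + 1)
    else c :: pvLoopB cs n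
termination_by cs _ => cs.length
decreasing_by
  · have := pvConsumeStr_len cs
    simp only [List.length_cons]; omega
  · simp
  · simp

def convert_positional_to_named_py_alt (query : String) (args : Option (List String)) : String × (List (String × String)) :=
  let converted := String.ofList (pvLoopB query.toList 0)
  match args with
  | none => (converted, [])
  | some l =>
      (converted, (PySem.List.enumerate l).map (fun iv => (String.ofList ("param_".toList ++ PySem.Int.toChars iv.1), iv.2)))

-- ===== PRECONDITION & SPEC =====
def Spec_convert_positional_to_named_py (query : String) (args : Option (List String)) (out : String × (List (String × String))) : Prop := out = convert_positional_to_named_py_alt query args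
instance (query : String) (args : Option (List String)) (out : String × (List (String × String))) : Decidable (Spec_convert_positional_to_named_py query args out) := by unfold Spec_convert_positional_to_named_py; infer_instance

-- ===== CLAIM (what is proved, stated in full; the proofs are below) =====
def Claim_equal_convert_positional_to_named_py : Prop := ∀ (query : String) (args : Option (List String)), Dom_convert_positional_to_named_py query args → Spec_convert_positional_to_named_py query args (convert_positional_to_named_py query args)

-- ===== LEMMAS AND PROOFS =====

-- A with in_string=false agrees with B's tokenizer; A with in_string=true agrees with
-- B's literal-consumer followed by the tokenizer. Strong induction on the length bound k.
theorem pvLoopA_nil (b : Bool) (n : Int) : pvLoopA [] b n = [] := by rw [pvLoopA.eq_def]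

theorem pvLoopB_nil (n : Int) : pvLoopB [] n = [] := by rw [pvLoopB.eq_def]

theorem pvMain : ∀ (k : Nat) (cs : List Char), cs.length ≤ k → ∀ n : Int,
    pvLoopA cs false n = pvLoopB cs n ∧
    pvLoopA cs true n = (pvConsumeStr cs).1 ++ pvLoopB (pvConsumeStr cs).2 n := by
  intro k
  induction k with
  | zero =>
    intro cs h n
    have : cs = [] := List.eq_nil_of_length_eq_zero (Nat.le_zero.mp h)
    subst this
    simp [pvLoopA_nil, pvLoopB_nil, pvConsumeStr]
  | succ k ih =>
    intro cs h n
    match cs with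
    | [] => simp [pvLoopA_nil, pvLoopB_nil, pvConsumeStr]
    | c :: cs' =>
      have hlen : cs'.length ≤ k := by simpa using Nat.lt_succ_iff.mp (by simpa using h)
      constructor
      · -- in_string = false
        by_cases hq : c = '\''
        · subst hq
          rw [pvLoopA.eq_def, pvLoopB.eq_def]
          simp [(ih cs' hlen n).2]
        · by_cases hc : c = '?'
          · subst hc
            rw [pvLoopA.eq_def, pvLoopB.eq_def]
            simp [hq, (ih cs' hlen (n + 1)).1]
          · rw [pvLoopA.eq_def, pvLoopB.eq_def]
            simp [hq, hc, (ih cs' hlen n).1]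
      · -- in_string = true
        by_cases hq : c = '\''
        · subst hq
          rw [pvLoopA.eq_def]
          match cs' with
          | [] => simp [pvLoopA_nil, pvLoopB_nil, pvConsumeStr]
          | c2 :: cs2 =>
            by_cases h2 : c2 = '\''
            · subst h2
              have hlen2 : cs2.length ≤ k := by
                simp only [List.length_cons] at hlen ⊢; omega
              simp [pvConsumeStr, (ih cs2 hlen2 n).2]
            · simp [pvConsumeStr, h2, (ih (c2 :: cs2) hlen n).1]
        · rw [pvLoopA.eq_def,
            show pvConsumeStr (c :: cs') = (c :: (pvConsumeStr cs').1, (pvConsumeStr cs').2) from by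
              rw [pvConsumeStr.eq_def]; simp [hq]]
          simp [hq, (ih cs' hlen n).2]

-- ===== VERDICT (by name: the statement is the Claim_ definition above) =====
theorem convert_positional_to_named_py_spec : Claim_equal_convert_positional_to_named_py := by
  intro query args _
  unfold Spec_convert_positional_to_named_py
  unfold convert_positional_to_named_py convert_positional_to_named_py_alt
  rw [(pvMain query.toList.length query.toList (Nat.le_refl _) 0).1]
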